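-- pv_equiv track=rewrite | github.com/1850298154/path_agent | ccpp/uav_assignment.py | assign_segments_to_uavs
-- ===== SOURCE A (Python) =====
-- def assign_segments_to_uavs(uav_num, edge_pts):
--     """
--     将任务段分配给各无人机（平均分配）
--
--     Args:
--         uav_num: 无人机数量
--         edge_pts: 分段起点的索引列表
--
--     Returns:
--         split_idx: 分割点索引列表
--     """
--     # uav_num <= pts_num
--     basic_seg_n = (len(edge_pts) - 1) // uav_num
--     reminder = (len(edge_pts) - 1) % uav_num
--
--     # 初始化分割点选择
--     split_idx = [0]
--
--     for i in range(uav_num):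
--         if i < reminder:
--             # 前 reminder 个无人机多分配一个余数
--             split_idx.append(split_idx[-1] + basic_seg_n + 1)
--         else:
--             split_idx.append(split_idx[-1] + basic_seg_n)
--
--     return split_idx
-- ===== SOURCE B (Python) =====
-- def assign_segments_to_uavs(uav_num, edge_pts):
--     basic_seg_n = (len(edge_pts) - 1) // uav_num
--     reminder = (len(edge_pts) - 1) % uav_num
--     return [0] + [i * basic_seg_n + min(i, reminder) for i in range(1, uav_num + 1)]
-- ===== Notes on version B (the rewrite author's own statement) =====
-- stated objective: simpler
-- what changed: Replaces the accumulator loop that extends split_idx from its own last element with a direct closed form: each split point i*basic_seg_n + min(i, reminder) is computed independently in a comprehension.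
import Mathlib
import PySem

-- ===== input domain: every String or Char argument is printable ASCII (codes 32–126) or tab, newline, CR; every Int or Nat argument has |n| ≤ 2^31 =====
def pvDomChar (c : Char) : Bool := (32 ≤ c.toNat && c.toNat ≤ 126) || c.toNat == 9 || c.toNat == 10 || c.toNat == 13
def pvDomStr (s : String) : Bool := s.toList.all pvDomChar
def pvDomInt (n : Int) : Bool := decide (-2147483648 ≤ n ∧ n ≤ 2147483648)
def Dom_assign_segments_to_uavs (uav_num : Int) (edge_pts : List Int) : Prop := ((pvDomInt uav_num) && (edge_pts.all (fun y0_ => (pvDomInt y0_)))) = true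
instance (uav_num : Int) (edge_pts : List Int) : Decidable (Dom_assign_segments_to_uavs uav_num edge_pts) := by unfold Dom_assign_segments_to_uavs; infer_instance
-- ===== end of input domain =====

-- B replaces A's accumulator loop (each split point appended from the previous one)
-- with a closed-form comprehension computing every split point independently; same cost, simpler.


-- ===== PORT A =====
def assign_segments_to_uavs (uav_num : Int) (edge_pts : List Int) : List Int :=
  let basic_seg_n := PySem.Int.floordiv ((edge_pts.length : Int) - 1) uav_num
  let reminder := PySem.Int.mod ((edge_pts.length : Int) - 1) uav_num
  (PySem.List.pyRange 0 uav_num 1).foldl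
    (fun split_idx i =>
      if i < reminder then
        split_idx ++ [(PySem.List.pyGet? split_idx (-1)).getD 0 + basic_seg_n + 1]
      else
        split_idx ++ [(PySem.List.pyGet? split_idx (-1)).getD 0 + basic_seg_n])
    [0]

-- ===== PORT B =====
def assign_segments_to_uavs_alt (uav_num : Int) (edge_pts : List Int) : List Int :=
  let basic_seg_n := PySem.Int.floordiv ((edge_pts.length : Int) - 1) uav_num
  let reminder := PySem.Int.mod ((edge_pts.length : Int) - 1) uav_num
  [0] ++ (PySem.List.pyRange 1 (uav_num + 1) 1).map (fun i => i * basic_seg_n + min i reminder)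

-- ===== PRECONDITION & SPEC =====
-- Pre_ excludes exactly uav_num = 0, where the Python A raises ZeroDivisionError (B raises there too).
def Pre_assign_segments_to_uavs (uav_num : Int) (edge_pts : List Int) : Prop := uav_num ≠ 0
instance (uav_num : Int) (edge_pts : List Int) : Decidable (Pre_assign_segments_to_uavs uav_num edge_pts) := by unfold Pre_assign_segments_to_uavs; infer_instance
def pvWitness_assign_segments_to_uavs : Int × List Int := (3, [0, 1, 2, 3, 4, 5, 6, 7])

def Spec_assign_segments_to_uavs (uav_num : Int) (edge_pts : List Int) (out : List Int) : Prop := out = assign_segments_to_uavs_alt uav_num edge_pts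
instance (uav_num : Int) (edge_pts : List Int) (out : List Int) : Decidable (Spec_assign_segments_to_uavs uav_num edge_pts out) := by unfold Spec_assign_segments_to_uavs; infer_instance

-- ===== CLAIM (what is proved, stated in full; the proofs are below) =====
def Claim_equal_assign_segments_to_uavs : Prop := ∀ (uav_num : Int) (edge_pts : List Int), Dom_assign_segments_to_uavs uav_num edge_pts → Pre_assign_segments_to_uavs uav_num edge_pts → Spec_assign_segments_to_uavs uav_num edge_pts (assign_segments_to_uavs uav_num edge_pts)

-- ===== LEMMAS AND PROOFS =====

-- the closed form for the k-th split point
def pvF (basic rem k : Int) : Int := k * basic + min k rem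

-- A's loop over [0,…,n-1] produces exactly the closed-form table over 0..n
lemma pvLoop_eq (basic rem : Int) (hrem : 0 ≤ rem) (n : Nat) :
    List.foldl
      (fun split_idx i =>
        if i < rem then split_idx ++ [(PySem.List.pyGet? split_idx (-1)).getD 0 + basic + 1]
        else split_idx ++ [(PySem.List.pyGet? split_idx (-1)).getD 0 + basic])
      [0] ((List.range n).map (fun k : Nat => (k : Int)))
    = (List.range (n + 1)).map (fun k : Nat => pvF basic rem (k : Int)) := by
  induction n with
  | zero => simp [pvF]; omega
  | succ n ih =>
    rw [List.range_succ, List.map_append, List.foldl_append, ih]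
    simp only [List.map_cons, List.map_nil, List.foldl_cons, List.foldl_nil]
    have hlast : (PySem.List.pyGet? ((List.range (n + 1)).map (fun k : Nat => pvF basic rem (k : Int))) (-1)).getD 0
        = pvF basic rem (n : Int) := by
      rw [PySem.List.pyGet?_neg_one, List.range_succ, List.map_append]
      simp
    rw [hlast, List.range_succ (n := n + 1), List.map_append]
    simp only [List.map_cons, List.map_nil]
    by_cases h : (n : Int) < rem
    · rw [if_pos h]
      have he : pvF basic rem (n : Int) + basic + 1 = pvF basic rem ((n + 1 : Nat) : Int) := by
        unfold pvF; push_cast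
        have hb : ((n : Int) + 1) * basic = (n : Int) * basic + basic := by ring
        omega
      rw [he]
    · rw [if_neg h]
      have he : pvF basic rem (n : Int) + basic = pvF basic rem ((n + 1 : Nat) : Int) := by
        unfold pvF; push_cast
        have hb : ((n : Int) + 1) * basic = (n : Int) * basic + basic := by ring
        omega
      rw [he]

-- ===== VERDICT (by name: the statement is the Claim_ definition above) =====
theorem assign_segments_to_uavs_spec : Claim_equal_assign_segments_to_uavs := by
  intro uav_num edge_pts _ hpre
  show _ = _
  unfold assign_segments_to_uavs assign_segments_to_uavs_alt
  set basic := PySem.Int.floordiv ((edge_pts.length : Int) - 1) uav_num with hb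
  set rem := PySem.Int.mod ((edge_pts.length : Int) - 1) uav_num with hr
  by_cases hpos : 0 < uav_num
  · -- positive uav_num: both sides equal the closed-form table
    obtain ⟨n, hn⟩ : ∃ n : Nat, uav_num = (n : Int) := ⟨uav_num.toNat, by omega⟩
    have hrem : 0 ≤ rem := by
      rw [hr, PySem.Int.mod_eq_emod_of_pos hpos]
      exact Int.emod_nonneg _ (by omega)
    have hA : PySem.List.pyRange 0 uav_num 1 = (List.range n).map (fun k : Nat => (k : Int)) := by
      rw [PySem.List.pyRange_one, hn]
      have : ((n : Int) - 0).toNat = n := by omega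
      rw [this]
      exact List.map_congr_left (fun k _ => by omega)
    have hB : PySem.List.pyRange 1 (uav_num + 1) 1 = (List.range n).map (fun k : Nat => (k : Int) + 1) := by
      rw [PySem.List.pyRange_one, hn]
      have : (((n : Int) + 1) - 1).toNat = n := by omega
      rw [this]
      exact List.map_congr_left (fun k _ => by omega)
    rw [hA, hB, pvLoop_eq basic rem hrem n, List.range_succ_eq_map, List.map_cons]
    have h0 : pvF basic rem ((0 : Nat) : Int) = 0 := by unfold pvF; omega
    simp only [h0, List.map_map, List.singleton_append]
    show _ = (0 : Int) :: _
    congr 1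
  · -- non-positive (and nonzero) uav_num: both ranges are empty, both sides are [0]
    have h1 : PySem.List.pyRange 0 uav_num 1 = [] := by
      rw [PySem.List.pyRange_one]
      have : (uav_num - 0).toNat = 0 := by omega
      rw [this]; rfl
    have h2 : PySem.List.pyRange 1 (uav_num + 1) 1 = [] := by
      rw [PySem.List.pyRange_one]
      have : ((uav_num + 1) - 1).toNat = 0 := by omega
      rw [this]; rfl
    rw [h1, h2]
    rfl
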